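-- pv_equiv track=rewrite | github.com/emiliano-gandini-outeda/DBWarden | dbwarden/engine/file_parser.py | _extract_section_statements
-- ===== SOURCE A (Python) =====
-- def _extract_section_statements(content: str, section_marker: str) -> list[str]:
--     """
--     Extract SQL statements from a section of a migration file.
--
--     Args:
--         content: Full content of the migration file.
--         section_marker: Marker indicating the section start (e.g., "-- upgrade").
--
--     Returns:
--         list[str]: List of SQL statements.
--     """
--     lines = content.split("\n")
--     statements: list[str] = []
--     current_statement: list[str] = []
--     in_section = False
--
--     for line in lines:
--         stripped = line.strip()
--
--         if stripped == section_marker: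
--             in_section = True
--             continue
--
--         if stripped == "-- rollback" and in_section:
--             if current_statement:
--                 statement = "\n".join(current_statement).strip()
--                 if statement:
--                     statements.append(statement)
--                 current_statement = []
--             in_section = False
--             continue
--
--         if in_section:
--             if stripped and not stripped.startswith("--"):
--                 current_statement.append(line)
--             elif current_statement and not stripped:
--                 statement = "\n".join(current_statement).strip()
--                 if statement:
--                     statements.append(statement)
--                 current_statement = []
--
--     if current_statement:
--         statement = "\n".join(current_statement).strip()
--         if statement:
--             statements.append(statement)
--
--     return statements
-- ===== SOURCE B (Python) =====
-- def _extract_section_statements(content: str, section_marker: str) -> list[str]: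
--     # Phase 1: collect the raw line regions between a marker line and a
--     # "-- rollback" line (or end of file); marker lines never enter a region.
--     regions = []
--     current = None
--     for line in content.split("\n"):
--         s = line.strip()
--         if s == section_marker:
--             if current is None:
--                 current = []
--         elif current is not None:
--             if s == "-- rollback":
--                 regions.append(current)
--                 current = None
--             else:
--                 current.append(line)
--     if current is not None:
--         regions.append(current)
--
--     # Phase 2: inside each region, groups are separated by blank lines;
--     # a group's statement is the join of its non-comment lines, stripped.
--     result = []
--     for region in regions:
--         groups, grp = [], []
--         for line in region:
--             if line.strip() == "":
--                 groups.append(grp)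
--                 grp = []
--             else:
--                 grp.append(line)
--         groups.append(grp)
--         for g in groups:
--             kept = [l for l in g if not l.strip().startswith("--")]
--             if kept:
--                 stmt = "\n".join(kept).strip()
--                 if stmt:
--                     result.append(stmt)
--     return result
-- ===== Notes on version B (the rewrite author's own statement) =====
-- stated objective: alternative
-- what changed: Replaced the incremental accumulator/flush state machine by a two-phase pass: first collect the raw marker..rollback regions, then split each region into blank-separated groups and map each group to its joined non-comment statement.
import Mathlib
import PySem

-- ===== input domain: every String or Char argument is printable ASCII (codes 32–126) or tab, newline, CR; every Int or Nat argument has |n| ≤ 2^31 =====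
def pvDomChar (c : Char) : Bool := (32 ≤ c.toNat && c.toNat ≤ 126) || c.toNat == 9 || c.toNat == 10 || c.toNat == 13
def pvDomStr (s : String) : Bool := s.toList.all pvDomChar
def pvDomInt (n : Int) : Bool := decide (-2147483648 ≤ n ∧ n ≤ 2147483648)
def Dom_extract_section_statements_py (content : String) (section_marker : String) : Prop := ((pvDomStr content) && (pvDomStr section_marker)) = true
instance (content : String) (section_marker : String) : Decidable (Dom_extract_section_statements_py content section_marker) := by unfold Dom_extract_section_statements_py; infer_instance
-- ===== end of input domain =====

-- B replaces A's incremental flush state machine by a two-phase region/group decomposition; same cost, different structure.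

-- ===== PORT A =====
-- flush: append "\n".join(cur).strip() to stmts when cur is nonempty and the stripped join is nonempty
def pvFlush (stmts : List String) (cur : List String) : List String :=
  if cur ≠ [] then
    let s := PySem.Str.strip (PySem.Str.join "\n" cur)
    if s ≠ "" then stmts ++ [s] else stmts
  else stmts

-- one iteration of A's for-loop; state = (statements, current_statement, in_section)
def pvAStep (marker : String) (st : List String × List String × Bool) (line : String) :
    List String × List String × Bool :=
  let stripped := PySem.Str.strip line
  if stripped = marker then (st.1, st.2.1, true)
  else if stripped = "-- rollback" ∧ st.2.2 = true then (pvFlush st.1 st.2.1, [], false)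
  else if st.2.2 = true then
    if stripped ≠ "" ∧ PySem.Str.startswith stripped "--" = false then (st.1, st.2.1 ++ [line], true)
    else if st.2.1 ≠ [] ∧ stripped = "" then (pvFlush st.1 st.2.1, [], true)
    else st
  else st

def extract_section_statements_py (content : String) (section_marker : String) : List String :=
  let lines := (PySem.Str.split? content "\n").getD []  -- sep "\n" ≠ "": split? is always some here
  let st := lines.foldl (pvAStep section_marker) ([], [], false)
  pvFlush st.1 st.2.1

-- ===== PORT B =====
-- phase-1 step: state = (closed regions, currently open region if any); marker lines open, "-- rollback" closes
def pvB1Step (marker : String) (st : List (List String) × Option (List String)) (line : String) :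
    List (List String) × Option (List String) :=
  let s := PySem.Str.strip line
  if s = marker then (st.1, some (st.2.getD []))
  else
    match st.2 with
    | none => st
    | some r => if s = "-- rollback" then (st.1 ++ [r], none) else (st.1, some (r ++ [line]))

-- phase-2 grouping step: blank lines separate groups
def pvGStep (st : List (List String) × List String) (line : String) :
    List (List String) × List String :=
  if PySem.Str.strip line = "" then (st.1 ++ [st.2], []) else (st.1, st.2 ++ [line])

-- a group's statement: join of its non-comment lines, stripped; none if nothing remains
def pvEmit (g : List String) : Option String :=
  let kept := g.filter (fun l => PySem.Str.startswith (PySem.Str.strip l) "--" = false)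
  if kept = [] then none
  else
    let s := PySem.Str.strip (PySem.Str.join "\n" kept)
    if s = "" then none else some s

def pvPerRegion (r : List String) : List String :=
  let p := r.foldl pvGStep ([], [])
  (p.1 ++ [p.2]).filterMap pvEmit

def extract_section_statements_py_alt (content : String) (section_marker : String) : List String :=
  let lines := (PySem.Str.split? content "\n").getD []  -- sep "\n" ≠ "": split? is always some here
  let st := lines.foldl (pvB1Step section_marker) ([], none)
  let regions := match st.2 with | none => st.1 | some r => st.1 ++ [r]
  regions.flatMap pvPerRegion

-- ===== PRECONDITION & SPEC =====
def Spec_extract_section_statements_py (content : String) (section_marker : String) (out : List String) : Prop := out = extract_section_statements_py_alt content section_marker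
instance (content : String) (section_marker : String) (out : List String) : Decidable (Spec_extract_section_statements_py content section_marker out) := by unfold Spec_extract_section_statements_py; infer_instance

-- ===== CLAIM (what is proved, stated in full; the proofs are below) =====
def Claim_equal_extract_section_statements_py : Prop := ∀ (content : String) (section_marker : String), Dom_extract_section_statements_py content section_marker → Spec_extract_section_statements_py content section_marker (extract_section_statements_py content section_marker)

-- ===== LEMMAS AND PROOFS =====

-- non-comment lines of a group = A's current_statement for that group
def pvKeep (g : List String) : List String :=
  g.filter (fun l => PySem.Str.startswith (PySem.Str.strip l) "--" = false)

-- abstraction: A's loop state corresponding to a B phase-1 state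
def pvAbs (regs : List (List String)) (cur? : Option (List String)) :
    List String × List String × Bool :=
  match cur? with
  | none => (regs.flatMap pvPerRegion, [], false)
  | some r =>
    let p := r.foldl pvGStep ([], [])
    (regs.flatMap pvPerRegion ++ p.1.filterMap pvEmit, pvKeep p.2, true)

theorem pvFlush_emit (S : List String) (g : List String) :
    pvFlush S (pvKeep g) = S ++ (pvEmit g).toList := by
  unfold pvFlush pvEmit pvKeep
  dsimp only
  split_ifs <;> simp_all

theorem pvKeep_nil : pvKeep [] = [] := rfl

theorem pvFilterMap_emit_singleton (x : List String) :
    List.filterMap pvEmit [x] = (pvEmit x).toList := by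
  cases h : pvEmit x <;> simp [h]

theorem pvEmit_of_keep_nil (g : List String) (hc : pvKeep g = []) : pvEmit g = none := by
  unfold pvEmit
  unfold pvKeep at hc
  rw [hc]
  simp

theorem pvKeep_append_keep (g : List String) (l : String)
    (h : PySem.Chars.startswith (PySem.Chars.strip l.toList) ['-', '-'] = false) :
    pvKeep (g ++ [l]) = pvKeep g ++ [l] := by
  simp [pvKeep, List.filter_append, h]

theorem pvKeep_append_comment (g : List String) (l : String)
    (h : PySem.Chars.startswith (PySem.Chars.strip l.toList) ['-', '-'] = true) :
    pvKeep (g ++ [l]) = pvKeep g := by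
  simp [pvKeep, List.filter_append, h]

theorem pvStep_comm (m : String) (regs : List (List String)) (cur? : Option (List String))
    (line : String) :
    pvAStep m (pvAbs regs cur?) line
      = pvAbs (pvB1Step m (regs, cur?) line).1 (pvB1Step m (regs, cur?) line).2 := by
  cases cur? with
  | none =>
    by_cases hm : PySem.Str.strip line = m
    · simp [pvAStep, pvB1Step, pvAbs, pvKeep_nil, hm]
    · simp [pvAStep, pvB1Step, pvAbs, hm]
  | some r =>
    by_cases hm : PySem.Str.strip line = m
    · simp [pvAStep, pvB1Step, pvAbs, hm]
    · by_cases hr : PySem.Str.strip line = "-- rollback"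
      · -- rollback line: A flushes and leaves the section; B closes the region
        rw [hr] at hm
        simp [pvAStep, pvB1Step, pvAbs, hm, hr, pvPerRegion, pvFlush_emit,
              pvFilterMap_emit_singleton, List.flatMap_append]
      · by_cases hb : PySem.Str.strip line = ""
        · -- blank line: A flushes (if nonempty); B closes the current group
          rw [hb] at hm hr
          by_cases hc : pvKeep ((List.foldl pvGStep ([], []) r).2) = []
          · have he := pvEmit_of_keep_nil _ hc
            simp [pvAStep, pvB1Step, pvAbs, hm, hr, hb, pvGStep, List.foldl_append,
                  hc, he, pvKeep_nil]
          · simp [pvAStep, pvB1Step, pvAbs, hm, hr, hb, pvGStep, List.foldl_append,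
                  hc, pvFlush_emit, pvKeep_nil, pvFilterMap_emit_singleton]
        · by_cases hcm : PySem.Str.startswith (PySem.Str.strip line) "--" = false
          · -- content line: appended to the statement / to the group
            simp at hcm
            simp [pvAStep, pvB1Step, pvAbs, hm, hr, hb, hcm, pvGStep, List.foldl_append,
                  pvKeep_append_keep _ _ hcm]
          · -- comment line: A skips it; B keeps it in the group, filtered out later
            simp at hcm
            simp [pvAStep, pvB1Step, pvAbs, hm, hr, hb, hcm, pvGStep, List.foldl_append,
                  pvKeep_append_comment _ _ hcm]

theorem pvFold_comm (m : String) (lines : List String) (regs : List (List String))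
    (cur? : Option (List String)) :
    lines.foldl (pvAStep m) (pvAbs regs cur?)
      = pvAbs (lines.foldl (pvB1Step m) (regs, cur?)).1 (lines.foldl (pvB1Step m) (regs, cur?)).2 := by
  induction lines generalizing regs cur? with
  | nil => rfl
  | cons l rest ih =>
    simp only [List.foldl_cons, pvStep_comm]
    exact ih _ _

-- ===== VERDICT (by name: the statement is the Claim_ definition above) =====
theorem extract_section_statements_py_spec : Claim_equal_extract_section_statements_py := by
  intro content marker _
  show extract_section_statements_py content marker = _
  unfold extract_section_statements_py extract_section_statements_py_alt
  dsimp only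
  generalize (PySem.Str.split? content "\n").getD [] = L
  have h0 : (([], [], false) : List String × List String × Bool) = pvAbs [] none := rfl
  rw [h0, pvFold_comm]
  cases h : (List.foldl (pvB1Step marker) ([], none) L).2 with
  | none => simp [pvAbs, pvFlush]
  | some r =>
    simp only [pvAbs]
    rw [pvFlush_emit]
    simp [pvPerRegion, pvFilterMap_emit_singleton, List.flatMap_append]
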